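-- pv_equiv track=rewrite | github.com/mindshackledsteven/aoc23 | day7/day7_pt1.py | is_high_card
-- ===== SOURCE A (Python) =====
-- def is_high_card(hand):
--     char_count = {}
--     for char in hand:
--         if char in char_count:
--             char_count[char] += 1
--         else:
--             char_count[char] = 1
--     return (sorted(char_count.values()) == [1, 1, 1, 1, 1])
-- ===== SOURCE B (Python) =====
-- def is_high_card(hand):
--     return len(set(hand)) == len(hand) == 5
-- ===== Notes on version B (the rewrite author's own statement) =====
-- stated objective: idiomatic
-- what changed: Replaces the hand-built count dictionary, sort of its values and comparison with [1,1,1,1,1] by a set-distinctness check: len(set(hand)) == len(hand) == 5.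
import Mathlib
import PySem

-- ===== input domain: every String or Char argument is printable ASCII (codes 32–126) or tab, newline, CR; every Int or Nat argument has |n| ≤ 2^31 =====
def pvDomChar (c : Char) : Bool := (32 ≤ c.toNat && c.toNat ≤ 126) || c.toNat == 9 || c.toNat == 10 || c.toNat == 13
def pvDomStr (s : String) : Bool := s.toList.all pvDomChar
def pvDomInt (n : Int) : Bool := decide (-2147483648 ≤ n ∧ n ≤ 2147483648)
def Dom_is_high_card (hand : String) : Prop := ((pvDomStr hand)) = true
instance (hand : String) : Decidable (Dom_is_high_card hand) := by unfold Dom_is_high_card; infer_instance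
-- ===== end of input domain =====

-- B replaces A's per-character count dictionary + values-sort + list comparison by the
-- idiomatic set-distinctness check len(set(hand)) == len(hand) == 5.


-- ===== PORT A =====
def is_high_card (hand : String) : Bool :=
  -- char_count = {}; for char in hand: if char in char_count: += 1 else: = 1
  let char_count : PySem.Dict Char Int :=
    hand.toList.foldl
      (fun d c =>
        if d.contains c then d.insert c ((d.get? c).getD 0 + 1)
        else d.insert c 1)
      PySem.Dict.empty
  -- return sorted(char_count.values()) == [1, 1, 1, 1, 1]
  decide (PySem.List.sorted char_count.values (fun v => v) = [1, 1, 1, 1, 1])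

-- ===== PORT B =====
def is_high_card_alt (hand : String) : Bool :=
  -- return len(set(hand)) == len(hand) == 5
  decide (PySem.Set.len (PySem.Set.ofList hand.toList) = PySem.Str.len hand
            ∧ PySem.Str.len hand = 5)

-- ===== PRECONDITION & SPEC =====
def Spec_is_high_card (hand : String) (out : Bool) : Prop := out = is_high_card_alt hand
instance (hand : String) (out : Bool) : Decidable (Spec_is_high_card hand out) := by unfold Spec_is_high_card; infer_instance

-- ===== CLAIM (what is proved, stated in full; the proofs are below) =====
def Claim_equal_is_high_card : Prop := ∀ (hand : String), Dom_is_high_card hand → Spec_is_high_card hand (is_high_card hand)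

-- ===== LEMMAS AND PROOFS =====

-- A's loop body is Counter's update step
theorem pv_loop_eq_counter (xs : List Char) :
    xs.foldl
      (fun (d : PySem.Dict Char Int) c =>
        if d.contains c then d.insert c ((d.get? c).getD 0 + 1)
        else d.insert c 1)
      PySem.Dict.empty = PySem.Dict.counter xs := by
  rw [← PySem.Dict.foldl_insert_getD_add_one_eq_counter]
  congr 1
  funext d c
  by_cases h : d.contains c = true
  · simp [h, PySem.Dict.getD]
  · simp [h, PySem.Dict.getD_of_not_contains d (0 : Int) (by simpa using h)]

-- the distinct-length criterion characterises Nodup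
theorem pv_len_ofList_eq_iff (xs : List Char) :
    (PySem.Set.ofList xs).length = xs.length ↔ xs.Nodup := by
  constructor
  · intro h
    have sp : List.Subperm (PySem.Set.ofList xs) xs :=
      List.subperm_of_subset (PySem.Set.nodup_ofList xs)
        (fun x hx => (PySem.Set.mem_ofList xs x).1 hx)
    have p : (PySem.Set.ofList xs).Perm xs := sp.perm_of_length_le (le_of_eq h.symm)
    exact p.nodup_iff.mp (PySem.Set.nodup_ofList xs)
  · intro h
    rw [PySem.Set.ofList_eq_self_of_nodup xs h]

-- A's sorted-values test characterised on the input string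
theorem pv_A_iff (xs : List Char) :
    PySem.List.sorted (PySem.Dict.counter xs).values (fun v => v) = [1, 1, 1, 1, 1]
      ↔ xs.Nodup ∧ xs.length = 5 := by
  have hv : (PySem.Dict.counter xs).values
      = (PySem.Set.ofList xs).map (fun k => (List.count k xs : Int)) := by
    have := PySem.Dict.items_counter xs
    simp only [PySem.Dict.values, this, List.map_map]
    rfl
  constructor
  · intro h
    have hp : ((PySem.Dict.counter xs).values).Perm [1, 1, 1, 1, 1] := by
      rw [← h]; exact (PySem.List.sorted_perm _ _ _).symm
    have hone : ∀ v ∈ (PySem.Dict.counter xs).values, v = (1 : Int) := by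
      intro v hvmem
      have := hp.mem_iff.mp hvmem
      simp at this; omega
    have hcount : ∀ k ∈ xs, List.count k xs = 1 := by
      intro k hk
      have hkm : k ∈ PySem.Set.ofList xs := (PySem.Set.mem_ofList xs k).2 hk
      have hvm : ((List.count k xs : Int)) ∈ (PySem.Dict.counter xs).values := by
        rw [hv]; exact List.mem_map.2 ⟨k, hkm, rfl⟩
      have := hone _ hvm
      exact_mod_cast this
    have hnodup : xs.Nodup := List.nodup_iff_count_eq_one.mpr hcount
    refine ⟨hnodup, ?_⟩
    have hlen : ((PySem.Dict.counter xs).values).length = 5 := by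
      simpa using hp.length_eq
    rw [hv, List.length_map, PySem.Set.ofList_eq_self_of_nodup xs hnodup] at hlen
    exact hlen
  · intro ⟨hn, h5⟩
    have hofl : PySem.Set.ofList xs = xs := PySem.Set.ofList_eq_self_of_nodup xs hn
    have hc : ∀ k ∈ xs, List.count k xs = 1 := List.nodup_iff_count_eq_one.mp hn
    have hv1 : (PySem.Dict.counter xs).values = List.replicate 5 (1 : Int) := by
      rw [hv, hofl]
      rw [List.eq_replicate_iff]
      constructor
      · simpa using h5
      · intro b hb
        simp only [List.mem_map] at hb
        obtain ⟨k, hk, rfl⟩ := hb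
        rw [hc k hk]; rfl
    rw [hv1]
    rw [PySem.List.sorted_eq_self_of_pairwise]
    · rfl
    · exact List.pairwise_replicate.2 (by simp)

-- ===== VERDICT (by name: the statement is the Claim_ definition above) =====
theorem is_high_card_spec : Claim_equal_is_high_card := by
  intro hand _
  unfold Spec_is_high_card is_high_card is_high_card_alt
  rw [pv_loop_eq_counter]
  simp only [decide_eq_decide]
  rw [pv_A_iff]
  simp only [PySem.Set.len, PySem.Str.len]
  rw [← pv_len_ofList_eq_iff]
  constructor
  · rintro ⟨h1, h2⟩
    constructor <;> omega
  · rintro ⟨h1, h2⟩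
    constructor <;> omega
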